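-- pv_equiv track=rewrite | github.com/IslandCow/papercuts | file/file.py | shortestString
-- ===== SOURCE A (Python) =====
-- def shortestString(file_list):
--   shortest = None
--   dups = False
--   for f in file_list:
--     if shortest == None:
--       shortest = f
--       continue
--
--     if len(shortest) > len(f):
--       shortest = f
--       dups = False
--     elif len(shortest) == len(f):
--       dups = True
--
--   return dups, file_list.index(shortest), shortest
-- ===== SOURCE B (Python) =====
-- def shortestString(file_list):
--   min_len = min(len(f) for f in file_list)
--   idx = next(i for i, f in enumerate(file_list) if len(f) == min_len)
--   dups = sum(1 for f in file_list if len(f) == min_len) >= 2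
--   return dups, idx, file_list[idx]
-- ===== Notes on version B (the rewrite author's own statement) =====
-- stated objective: simpler
-- what changed: Replaces A's stateful single pass (current-shortest with a reset dups flag, plus a trailing list.index scan) by three direct passes: the minimum length, the first index attaining it, and 'at least two elements of minimum length' for the dups flag.
import Mathlib
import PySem

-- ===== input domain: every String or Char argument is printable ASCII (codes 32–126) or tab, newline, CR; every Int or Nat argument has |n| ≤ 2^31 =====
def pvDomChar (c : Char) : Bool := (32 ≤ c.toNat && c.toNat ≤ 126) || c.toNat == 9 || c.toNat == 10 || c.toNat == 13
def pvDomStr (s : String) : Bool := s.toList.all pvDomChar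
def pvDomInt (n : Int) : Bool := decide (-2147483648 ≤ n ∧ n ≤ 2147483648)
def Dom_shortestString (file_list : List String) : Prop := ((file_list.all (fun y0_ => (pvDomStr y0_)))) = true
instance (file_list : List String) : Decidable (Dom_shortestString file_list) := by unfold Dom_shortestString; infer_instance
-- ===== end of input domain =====

-- B is a simpler three-pass decomposition (min length, first index at it, count ≥ 2) of A's
-- stateful scan; equivalence of the return values is proved on non-empty lists.

-- ===== PORT A =====
-- one fold step of A's loop over state (shortest, dups)
def pvStepA (acc : Option String × Bool) (f : String) : Option String × Bool :=
  match acc.1 with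
  | none => (some f, acc.2)
  | some s =>
    if PySem.Str.len s > PySem.Str.len f then (some f, false)
    else if PySem.Str.len s == PySem.Str.len f then (some s, true)
    else (some s, acc.2)

def shortestString (file_list : List String) : Bool × Int × String :=
  let st := file_list.foldl pvStepA (none, false)
  match st.1 with
  | none => (st.2, 0, "")      -- Python raises ValueError here (empty list, excluded by Pre_)
  | some s =>
    match PySem.List.index? file_list s with
    | some i => (st.2, (i : Int), s)
    | none => (st.2, 0, s)     -- unreachable: shortest ∈ file_list

-- ===== PORT B =====
def shortestString_alt (file_list : List String) : Bool × Int × String :=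
  match PySem.List.min? (file_list.map (fun f => PySem.Str.len f)) (fun x => x) with
  | none => (false, 0, "")     -- Python raises ValueError here (empty list, excluded by Pre_)
  | some m =>
    match file_list.findIdx? (fun f => PySem.Str.len f == m) with
    | none => (false, 0, "")   -- unreachable: the minimum is attained
    | some idx =>
      let dups := decide (2 ≤ file_list.countP (fun f => PySem.Str.len f == m))
      (dups, (idx : Int), (PySem.List.pyGet? file_list (idx : Int)).getD "")

-- ===== PRECONDITION & SPEC =====
-- Pre_ excludes only the empty list, on which both Pythons raise ValueError.
def Pre_shortestString (file_list : List String) : Prop := file_list ≠ []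
instance (file_list : List String) : Decidable (Pre_shortestString file_list) := by unfold Pre_shortestString; infer_instance
def pvWitness_shortestString : List String := ["ab", "c", "de"]
def Spec_shortestString (file_list : List String) (out : Bool × Int × String) : Prop := out = shortestString_alt file_list
instance (file_list : List String) (out : Bool × Int × String) : Decidable (Spec_shortestString file_list out) := by unfold Spec_shortestString; infer_instance

-- ===== CLAIM (what is proved, stated in full; the proofs are below) =====
def Claim_equal_shortestString : Prop := ∀ (file_list : List String), Dom_shortestString file_list → Pre_shortestString file_list → Spec_shortestString file_list (shortestString file_list)

-- ===== LEMMAS AND PROOFS =====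

-- minimum of the lengths of s :: l
def pvM (s : String) (l : List String) : Int := (l.map (fun f => PySem.Str.len f)).foldl min (PySem.Str.len s)

theorem pvM_cons (s f : String) (l : List String) :
    pvM s (f :: l) = pvM (if PySem.Str.len s ≤ PySem.Str.len f then s else f) l := by
  unfold pvM
  split <;> rename_i h <;> simp only [List.map_cons, List.foldl_cons] <;> congr 1 <;>
    simp_all [min_def]

theorem pvM_le_self (s : String) (l : List String) : pvM s l ≤ PySem.Str.len s := by
  induction l generalizing s with
  | nil => simp [pvM]
  | cons f t ih =>
    rw [pvM_cons]
    split <;> rename_i h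
    · exact ih s
    · exact le_trans (ih f) (by omega)

theorem pvM_attained (s : String) (l : List String) :
    ∃ x ∈ s :: l, PySem.Str.len x = pvM s l := by
  induction l generalizing s with
  | nil => exact ⟨s, by simp, by simp [pvM]⟩
  | cons f t ih =>
    rw [pvM_cons]
    split <;> rename_i h
    · obtain ⟨x, hx, he⟩ := ih s
      exact ⟨x, by simp only [List.mem_cons] at hx ⊢; tauto, he⟩
    · obtain ⟨x, hx, he⟩ := ih f
      exact ⟨x, by simp only [List.mem_cons] at hx ⊢; tauto, he⟩

-- lower bound: pvM is below every member's length
theorem pvM_le_mem (s : String) (l : List String) :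
    ∀ x ∈ s :: l, pvM s l ≤ PySem.Str.len x := by
  induction l generalizing s with
  | nil =>
    intro x hx
    simp only [List.mem_singleton] at hx
    rw [hx]; simp [pvM]
  | cons f t ih =>
    intro x hx
    rw [pvM_cons]
    split <;> rename_i h
    · rcases List.mem_cons.mp hx with h1 | hx'
      · rw [h1]; exact pvM_le_self s t
      rcases List.mem_cons.mp hx' with h1 | hx''
      · rw [h1]; exact le_trans (pvM_le_self s t) h
      · exact ih s x (List.mem_cons_of_mem _ hx'')
    · rcases List.mem_cons.mp hx with h1 | hx'
      · rw [h1]; exact le_trans (pvM_le_self f t) (by omega)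
      rcases List.mem_cons.mp hx' with h1 | hx''
      · rw [h1]; exact pvM_le_self f t
      · exact ih f x (List.mem_cons_of_mem _ hx'')

-- the master characterisation of A's fold, for any running state (some s, d)
theorem foldA_char (l : List String) (s : String) (d : Bool) :
    List.foldl pvStepA (some s, d) l =
      ( List.find? (fun x => PySem.Str.len x == pvM s l) (s :: l),
        decide (2 ≤ (s :: l).countP (fun x => PySem.Str.len x == pvM s l)) ||
          (d && l.all (fun x => PySem.Str.len s < PySem.Str.len x)) ) := by
  induction l generalizing s d with
  | nil =>
    simp [pvM, List.find?, List.countP, List.countP.go]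
  | cons f t ih =>
    simp only [List.foldl_cons]
    rcases lt_trichotomy (PySem.Str.len f) (PySem.Str.len s) with hlt | heq | hgt
    · -- the new element is strictly shorter: shortest := f, dups := False
      have hstep : pvStepA (some s, d) f = (some f, false) := by
        show (if PySem.Str.len s > PySem.Str.len f then (some f, false)
              else if PySem.Str.len s == PySem.Str.len f then (some s, true)
              else (some s, d)) = (some f, false)
        rw [if_pos (by omega)]
      rw [hstep, ih f false]
      have hm : pvM s (f :: t) = pvM f t := by rw [pvM_cons, if_neg (by omega)]
      rw [hm]
      have hmle := pvM_le_self f t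
      have hps : ¬ ((fun x => PySem.Str.len x == pvM f t) s = true) := by
        simp only [beq_iff_eq]; omega
      simp only [Prod.mk.injEq]
      refine ⟨?_, ?_⟩
      · rw [List.find?_cons_of_neg (p := fun x => PySem.Str.len x == pvM f t) hps]
      · rw [List.countP_cons_of_neg (p := fun x => PySem.Str.len x == pvM f t) hps]
        have hall : (f :: t).all (fun x => PySem.Str.len s < PySem.Str.len x) = false := by
          rw [List.all_eq_false]
          exact ⟨f, List.mem_cons_self, by simp only [decide_eq_true_eq]; omega⟩
        simp only [hall, Bool.and_false, Bool.false_and, Bool.or_false]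
    · -- equal length: dups := True, shortest kept
      have hstep : pvStepA (some s, d) f = (some s, true) := by
        show (if PySem.Str.len s > PySem.Str.len f then (some f, false)
              else if PySem.Str.len s == PySem.Str.len f then (some s, true)
              else (some s, d)) = (some s, true)
        rw [if_neg (by omega), if_pos (beq_iff_eq.mpr (by omega))]
      rw [hstep, ih s true]
      have hm : pvM s (f :: t) = pvM s t := by rw [pvM_cons, if_pos (by omega)]
      rw [hm]
      have hmle := pvM_le_self s t
      have hallf : (f :: t).all (fun x => PySem.Str.len s < PySem.Str.len x) = false := by
        rw [List.all_eq_false]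
        exact ⟨f, List.mem_cons_self, by simp only [decide_eq_true_eq]; omega⟩
      rw [hallf, Bool.and_false, Bool.or_false, Bool.true_and]
      simp only [Prod.mk.injEq]
      by_cases hps : PySem.Str.len s = pvM s t
      · -- the running shortest attains the minimum; f does too, so count ≥ 2 on the right
        have hpsb : ((fun x => PySem.Str.len x == pvM s t) s = true) := by
          simp only [beq_iff_eq]; omega
        have hpfb : ((fun x => PySem.Str.len x == pvM s t) f = true) := by
          simp only [beq_iff_eq]; omega
        refine ⟨?_, ?_⟩
        · rw [List.find?_cons_of_pos (p := fun x => PySem.Str.len x == pvM s t) hpsb,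
              List.find?_cons_of_pos (p := fun x => PySem.Str.len x == pvM s t) hpsb]
        · rw [List.countP_cons_of_pos (p := fun x => PySem.Str.len x == pvM s t) hpsb,
              List.countP_cons_of_pos (p := fun x => PySem.Str.len x == pvM s t) hpsb,
              List.countP_cons_of_pos (p := fun x => PySem.Str.len x == pvM s t) hpfb]
          have hrhs : decide (2 ≤ List.countP (fun x => PySem.Str.len x == pvM s t) t + 1 + 1)
              = true := by simp
          rw [hrhs]
          by_cases hall : t.all (fun x => PySem.Str.len s < PySem.Str.len x) = true
          · rw [hall, Bool.or_true]
          · -- some element of t is not longer than s, hence has minimal length too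
            have hf : t.all (fun x => PySem.Str.len s < PySem.Str.len x) = false :=
              Bool.eq_false_iff.mpr hall
            obtain ⟨x, hxt, hxf⟩ := List.all_eq_false.mp hf
            have h1 : pvM s t ≤ PySem.Str.len x := pvM_le_mem s t x (List.mem_cons_of_mem _ hxt)
            have h2 : ¬ (PySem.Str.len s < PySem.Str.len x) := by simpa using hxf
            have hpx : (fun x => PySem.Str.len x == pvM s t) x = true := by
              simp only [beq_iff_eq]; omega
            have hc : 0 < List.countP (fun x => PySem.Str.len x == pvM s t) t :=
              List.countP_pos_iff.mpr ⟨x, hxt, hpx⟩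
            have hdec : decide (2 ≤ List.countP (fun x => PySem.Str.len x == pvM s t) t + 1)
                = true := by
              simp only [decide_eq_true_eq]; omega
            rw [hdec, Bool.true_or]
      · have hlt' : pvM s t < PySem.Str.len s := lt_of_le_of_ne hmle (fun h => hps h.symm)
        have hpsb : ¬ ((fun x => PySem.Str.len x == pvM s t) s = true) := by
          simp only [beq_iff_eq]; omega
        have hpfb : ¬ ((fun x => PySem.Str.len x == pvM s t) f = true) := by
          simp only [beq_iff_eq]; omega
        obtain ⟨x, hx, hxe⟩ := pvM_attained s t
        have hxt : x ∈ t := by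
          rcases List.mem_cons.mp hx with h1 | h1
          · rw [h1] at hxe; omega
          · exact h1
        have hall : t.all (fun x => PySem.Str.len s < PySem.Str.len x) = false := by
          rw [List.all_eq_false]
          exact ⟨x, hxt, by simp only [decide_eq_true_eq]; omega⟩
        rw [hall, Bool.or_false]
        refine ⟨?_, ?_⟩
        · rw [List.find?_cons_of_neg (p := fun x => PySem.Str.len x == pvM s t) hpsb,
              List.find?_cons_of_neg (p := fun x => PySem.Str.len x == pvM s t) hpsb,
              List.find?_cons_of_neg (p := fun x => PySem.Str.len x == pvM s t) hpfb]
        · rw [List.countP_cons_of_neg (p := fun x => PySem.Str.len x == pvM s t) hpsb,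
              List.countP_cons_of_neg (p := fun x => PySem.Str.len x == pvM s t) hpsb,
              List.countP_cons_of_neg (p := fun x => PySem.Str.len x == pvM s t) hpfb]
    · -- the new element is strictly longer: state unchanged
      have hstep : pvStepA (some s, d) f = (some s, d) := by
        show (if PySem.Str.len s > PySem.Str.len f then (some f, false)
              else if PySem.Str.len s == PySem.Str.len f then (some s, true)
              else (some s, d)) = (some s, d)
        rw [if_neg (by omega), if_neg (by intro hh; exact absurd (beq_iff_eq.mp hh) (by omega))]
      rw [hstep, ih s d]
      have hm : pvM s (f :: t) = pvM s t := by rw [pvM_cons, if_pos (by omega)]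
      rw [hm]
      have hmle := pvM_le_self s t
      have hpfb : ¬ ((fun x => PySem.Str.len x == pvM s t) f = true) := by
        simp only [beq_iff_eq]; omega
      have hallc : (f :: t).all (fun x => PySem.Str.len s < PySem.Str.len x)
          = t.all (fun x => PySem.Str.len s < PySem.Str.len x) := by
        rw [List.all_cons, decide_eq_true (by omega : PySem.Str.len s < PySem.Str.len f),
            Bool.true_and]
      rw [hallc]
      simp only [Prod.mk.injEq]
      by_cases hps : (fun x => PySem.Str.len x == pvM s t) s = true
      · refine ⟨?_, ?_⟩
        · rw [List.find?_cons_of_pos (p := fun x => PySem.Str.len x == pvM s t) hps,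
              List.find?_cons_of_pos (p := fun x => PySem.Str.len x == pvM s t) hps]
        · rw [List.countP_cons_of_pos (p := fun x => PySem.Str.len x == pvM s t) hps,
              List.countP_cons_of_pos (p := fun x => PySem.Str.len x == pvM s t) hps,
              List.countP_cons_of_neg (p := fun x => PySem.Str.len x == pvM s t) hpfb]
      · refine ⟨?_, ?_⟩
        · rw [List.find?_cons_of_neg (p := fun x => PySem.Str.len x == pvM s t) hps,
              List.find?_cons_of_neg (p := fun x => PySem.Str.len x == pvM s t) hps,
              List.find?_cons_of_neg (p := fun x => PySem.Str.len x == pvM s t) hpfb]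
        · rw [List.countP_cons_of_neg (p := fun x => PySem.Str.len x == pvM s t) hps,
              List.countP_cons_of_neg (p := fun x => PySem.Str.len x == pvM s t) hps,
              List.countP_cons_of_neg (p := fun x => PySem.Str.len x == pvM s t) hpfb]

-- first index of the found element: idxOf? of the find? result is findIdx?
theorem idxOf?_find? {p : String → Bool} (xs : List String) (v : String)
    (h : xs.find? p = some v) : PySem.List.index? xs v = xs.findIdx? p := by
  induction xs with
  | nil => simp at h
  | cons x t ih =>
    by_cases hx : p x
    · rw [List.find?_cons_of_pos hx] at h
      injection h with h; subst h
      rw [PySem.List.index?_cons_self, List.findIdx?_cons, if_pos hx]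
    · rw [List.find?_cons_of_neg hx] at h
      have hne : x ≠ v := by
        rintro rfl
        exact hx (List.find?_some h)
      rw [PySem.List.index?_cons_of_ne t hne, List.findIdx?_cons, if_neg hx, ih h]

theorem getElem?_findIdx? {p : String → Bool} (xs : List String) (i : Nat)
    (h : xs.findIdx? p = some i) : xs[i]? = xs.find? p := by
  induction xs generalizing i with
  | nil => simp at h
  | cons x t ih =>
    rw [List.findIdx?_cons] at h
    by_cases hx : p x
    · rw [if_pos hx] at h
      injection h with h
      simp [← h, List.find?_cons_of_pos hx]
    · rw [if_neg hx] at h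
      cases hi : t.findIdx? p with
      | none => simp [hi] at h
      | some j =>
        rw [hi] at h
        simp only [Option.map_some] at h
        injection h with h
        rw [← h, List.find?_cons_of_neg hx]
        simpa using ih j hi

-- ===== VERDICT (by name: the statement is the Claim_ definition above) =====
theorem shortestString_spec : Claim_equal_shortestString := by
  intro fl _ hpre
  unfold Spec_shortestString
  cases fl with
  | nil => exact absurd rfl hpre
  | cons h t =>
    have hfold : List.foldl pvStepA ((none : Option String), false) (h :: t)
        = ( List.find? (fun x => PySem.Str.len x == pvM h t) (h :: t),
            decide (2 ≤ (h :: t).countP (fun x => PySem.Str.len x == pvM h t)) ) := by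
      rw [List.foldl_cons]
      have h0 : pvStepA ((none : Option String), false) h = (some h, false) := rfl
      rw [h0, foldA_char t h false]
      simp
    obtain ⟨x, hx, hxe⟩ := pvM_attained h t
    have hsome : (List.find? (fun x => PySem.Str.len x == pvM h t) (h :: t)).isSome := by
      rw [List.find?_isSome]
      exact ⟨x, hx, by simp only [beq_iff_eq]; omega⟩
    obtain ⟨v, hv⟩ := Option.isSome_iff_exists.mp hsome
    have hvm : v ∈ h :: t := List.mem_of_find?_eq_some hv
    have hidx : PySem.List.index? (h :: t) v
        = (h :: t).findIdx? (fun x => PySem.Str.len x == pvM h t) :=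
      idxOf?_find? _ v hv
    have hisome : (PySem.List.index? (h :: t) v).isSome :=
      (PySem.List.index?_isSome_iff _ _).mpr hvm
    obtain ⟨i, hi⟩ := Option.isSome_iff_exists.mp hisome
    have hA : shortestString (h :: t) =
        (decide (2 ≤ (h :: t).countP (fun x => PySem.Str.len x == pvM h t)), (i : Int), v) := by
      simp only [shortestString, hfold, hv, hi]
    have hmin : PySem.List.min? ((h :: t).map (fun f => PySem.Str.len f)) (fun x => x)
        = some (pvM h t) := by
      rw [List.map_cons, PySem.List.min?_id_cons]; rfl
    have hfi : (h :: t).findIdx? (fun f => PySem.Str.len f == pvM h t) = some i := by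
      rw [← hidx, hi]
    have hget : PySem.List.pyGet? (h :: t) (i : Int) = some v := by
      rw [PySem.List.pyGet?_natCast, getElem?_findIdx? _ i hfi, hv]
    have hB : shortestString_alt (h :: t) =
        (decide (2 ≤ (h :: t).countP (fun f => PySem.Str.len f == pvM h t)), (i : Int), v) := by
      simp only [shortestString_alt, hmin, hfi, hget, Option.getD_some]
    rw [hA, hB]
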